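-- pv_equiv track=rewrite | github.com/KAdamczykk/LearningPY | macierze/l9 iad 2021.py | dodaj_nowe_danie
-- ===== SOURCE A (Python) =====
-- def dodaj_nowe_danie(dane, lista):
--     kolumny = len(dane[0])
--     wiersze = len(dane)+1
--     M = [[0]*kolumny for a in range(wiersze)]
--     k=0
--     for i in range(wiersze):
--         for j in range(kolumny):
--             if i == wiersze-1:
--                 if j in lista:
--                     M[i][j]=1
--                 else:
--                     M[i][j]=0
--             else:
--                 M[i][j]=dane[i][j]
--     return M
-- ===== SOURCE B (Python) =====
-- def dodaj_nowe_danie(dane, lista):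
--     kolumny = len(dane[0])
--     # Build the indicator row by a marking pass over lista (instead of
--     # testing every column for membership): start all-zero, set marked slots.
--     ostatni = [0] * kolumny
--     for v in lista:
--         if 0 <= v < kolumny:
--             ostatni[v] = 1
--     return [w[:kolumny] for w in dane] + [ostatni]
-- ===== Notes on version B (the rewrite author's own statement) =====
-- stated objective: simpler
-- what changed: Inverts the indicator-row construction: instead of A's grid scan that tests every column index for membership in lista, B makes one marking pass over lista, setting the in-range positions of a zero row to 1, and prepends truncated copies of the existing rows; the per-cell branch and the per-cell membership scan both disappear.
import Mathlib
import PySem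

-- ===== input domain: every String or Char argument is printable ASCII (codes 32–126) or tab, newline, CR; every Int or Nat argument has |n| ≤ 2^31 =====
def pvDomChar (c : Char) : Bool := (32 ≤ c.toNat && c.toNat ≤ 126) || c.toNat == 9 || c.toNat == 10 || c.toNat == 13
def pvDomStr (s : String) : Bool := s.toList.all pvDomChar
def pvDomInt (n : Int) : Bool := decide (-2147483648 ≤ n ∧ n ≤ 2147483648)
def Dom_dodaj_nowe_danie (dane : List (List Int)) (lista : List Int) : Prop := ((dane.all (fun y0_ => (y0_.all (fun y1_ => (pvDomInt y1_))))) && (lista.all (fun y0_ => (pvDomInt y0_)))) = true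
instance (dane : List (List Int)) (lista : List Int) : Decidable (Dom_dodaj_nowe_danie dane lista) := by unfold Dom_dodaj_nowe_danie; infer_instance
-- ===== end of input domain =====

-- B inverts the indicator-row construction: one marking pass over lista sets the in-range slots
-- of a zero row, instead of A's grid scan testing each column for membership; equivalence of the
-- return value is proved on Pre_ (where A returns normally).

-- ===== PORT A =====
-- zero grid of wiersze rows × kolumny columns, then the nested index loop mutating M;
-- dane[i][j] is total here because on Pre_ every row reached has length ≥ kolumny.
def dodaj_nowe_danie (dane : List (List Int)) (lista : List Int) : List (List Int) :=
  let kolumny := ((PySem.List.pyGet? dane 0).getD []).length  -- len(dane[0]); outside Pre_ (dane = []) Python raises here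
  let wiersze := dane.length + 1
  let M0 : List (List Int) := (List.range wiersze).map (fun _ => List.replicate kolumny (0 : Int))
  (List.range wiersze).foldl (fun M i =>
    (List.range kolumny).foldl (fun M (j : Nat) =>
      let v : Int :=
        if i = wiersze - 1 then
          (if lista.contains (j : Int) then 1 else 0)
        else
          (dane.getD i []).getD j 0  -- dane[i][j]; in range on Pre_, outside Pre_ Python raises IndexError
      M.set i ((M.getD i []).set j v)) M) M0

-- ===== PORT B =====
def dodaj_nowe_danie_alt (dane : List (List Int)) (lista : List Int) : List (List Int) :=
  let kolumny := ((PySem.List.pyGet? dane 0).getD []).length  -- len(dane[0]); same raise point outside Pre_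
  -- marking pass: ostatni = [0]*kolumny; for v in lista: if 0 <= v < kolumny: ostatni[v] = 1
  let ostatni := lista.foldl
    (fun (row : List Int) (v : Int) =>
      if 0 ≤ v ∧ v < (kolumny : Int) then row.set v.toNat 1 else row)
    (List.replicate kolumny (0 : Int))
  dane.map (fun w => PySem.List.slice w none (some (kolumny : Int))) ++ [ostatni]

-- ===== PRECONDITION & SPEC =====
-- Pre_ excludes exactly the inputs where Python A raises IndexError: empty dane (len(dane[0]))
-- and matrices with a row shorter than len(dane[0]) (dane[i][j] out of range).
def Pre_dodaj_nowe_danie (dane : List (List Int)) (lista : List Int) : Prop :=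
  dane ≠ [] ∧ ∀ r ∈ dane, (dane.headD []).length ≤ r.length
instance (dane : List (List Int)) (lista : List Int) : Decidable (Pre_dodaj_nowe_danie dane lista) := by
  unfold Pre_dodaj_nowe_danie; infer_instance
def pvWitness_dodaj_nowe_danie : List (List Int) × List Int := ([[1, 2], [3, 4]], [0, 5])

def Spec_dodaj_nowe_danie (dane : List (List Int)) (lista : List Int) (out : List (List Int)) : Prop := out = dodaj_nowe_danie_alt dane lista
instance (dane : List (List Int)) (lista : List Int) (out : List (List Int)) : Decidable (Spec_dodaj_nowe_danie dane lista out) := by unfold Spec_dodaj_nowe_danie; infer_instance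

-- ===== CLAIM (what is proved, stated in full; the proofs are below) =====
def Claim_equal_dodaj_nowe_danie : Prop := ∀ (dane : List (List Int)) (lista : List Int), Dom_dodaj_nowe_danie dane lista → Pre_dodaj_nowe_danie dane lista → Spec_dodaj_nowe_danie dane lista (dodaj_nowe_danie dane lista)

-- ===== LEMMAS AND PROOFS =====

/-- Folding `set j (f j)` over `range n` rewrites the first `n` entries. -/
lemma pv_fold_set_range {α : Type} (f : Nat → α) :
    ∀ (n : Nat) (r : List α), n ≤ r.length →
      (List.range n).foldl (fun r j => r.set j (f j)) r = (List.range n).map f ++ r.drop n := by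
  intro n
  induction n with
  | zero => intro r _; simp
  | succ n ih =>
    intro r hn
    rw [List.range_succ, List.foldl_append, List.map_append]
    simp only [List.foldl_cons, List.foldl_nil]
    rw [ih r (by omega)]
    have hlt : n < r.length := by omega
    rw [List.drop_eq_getElem_cons hlt]
    rw [List.set_append_right _ _ (by simp)]
    simp only [List.length_map, List.length_range, Nat.sub_self, List.set_cons_zero]
    simp

/-- The inner fold only touches row `i`; it collapses to one `set`. -/
lemma pv_fold_set2 (v : Nat → Int) :
    ∀ (js : List Nat) (M : List (List Int)) (i : Nat), i < M.length →
      js.foldl (fun M j => M.set i ((M.getD i []).set j (v j))) M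
        = M.set i (js.foldl (fun r j => r.set j (v j)) (M.getD i [])) := by
  intro js
  induction js with
  | nil =>
    intro M i hi
    simp only [List.foldl_nil]
    rw [List.getD_eq_getElem?_getD, List.getElem?_eq_getElem hi]
    exact (List.set_getElem_self hi).symm
  | cons j js ih =>
    intro M i hi
    simp only [List.foldl_cons]
    rw [ih _ i (by simpa using hi)]
    have hg : (M.set i ((M.getD i []).set j (v j))).getD i [] = (M.getD i []).set j (v j) := by
      simp [List.getD_eq_getElem?_getD, List.getElem?_set_self hi]
    rw [hg, List.set_set]

/-- The whole double loop of A, characterised. -/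
lemma pv_outer (v : Nat → Nat → Int) (k : Nat) :
    ∀ (n : Nat) (M : List (List Int)), n ≤ M.length → (∀ r ∈ M, r.length = k) →
      (List.range n).foldl (fun M i =>
          (List.range k).foldl (fun M j => M.set i ((M.getD i []).set j (v i j))) M) M
        = (List.range n).map (fun i => (List.range k).map (v i)) ++ M.drop n := by
  intro n
  induction n with
  | zero => intro M _ _; simp
  | succ n ih =>
    intro M hn hk
    rw [List.range_succ, List.foldl_append, List.map_append]
    simp only [List.foldl_cons, List.foldl_nil]
    rw [ih M (by omega) hk]
    have hlt : n < M.length := by omega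
    set P := (List.range n).map (fun i => (List.range k).map (v i)) ++ M.drop n with hP
    have hPlen : P.length = M.length := by simp [hP]; omega
    rw [pv_fold_set2 (v n) _ P n (by omega)]
    have hPn : P.getD n [] = M[n] := by
      simp [hP, List.getD_eq_getElem?_getD, List.getElem?_append_right (by simp : ((List.range n).map (fun i => (List.range k).map (v i))).length ≤ n)]
      simp [hlt]
    have hrk : (M[n] : List Int).length = k := hk _ (List.getElem_mem hlt)
    rw [hPn, pv_fold_set_range (v n) k M[n] (by omega)]
    have : (M[n] : List Int).drop k = [] := by
      rw [List.drop_eq_nil_iff]; omega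
    rw [this, List.append_nil]
    rw [hP, List.set_append_right _ _ (by simp)]
    simp only [List.length_map, List.length_range, Nat.sub_self]
    rw [List.drop_eq_getElem_cons hlt, List.set_cons_zero]
    simp

/-- `range k` mapped through `getD` recovers `take k` when `k ≤` the length. -/
lemma pv_map_range_getD (r : List Int) (k : Nat) (hk : k ≤ r.length) :
    (List.range k).map (fun j => r.getD j 0) = r.take k := by
  apply List.ext_getElem
  · simp; omega
  · intro m h1 h2
    simp only [List.getElem_map, List.getElem_range, List.getElem_take]
    have : m < r.length := by simp at h2; omega
    simp [List.getD_eq_getElem?_getD, List.getElem?_eq_getElem this]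

/-- The marking fold preserves the row length. -/
lemma pv_mark_length (k : Nat) :
    ∀ (l : List Int) (row : List Int),
      (l.foldl (fun (row : List Int) (v : Int) =>
          if 0 ≤ v ∧ v < (k : Int) then row.set v.toNat 1 else row) row).length
        = row.length := by
  intro l
  induction l with
  | nil => intro row; simp
  | cons v l ih =>
    intro row
    simp only [List.foldl_cons]
    rw [ih]
    split_ifs <;> simp

/-- Pointwise value of the marking fold: `1` if the index occurs in the list, else unchanged. -/
lemma pv_mark_getD (k : Nat) :
    ∀ (l : List Int) (row : List Int), row.length = k → ∀ (j : Nat), j < k →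
      (l.foldl (fun (row : List Int) (v : Int) =>
          if 0 ≤ v ∧ v < (k : Int) then row.set v.toNat 1 else row) row).getD j 0
        = if l.contains (j : Int) then 1 else row.getD j 0 := by
  intro l
  induction l with
  | nil => intro row hr j hj; simp
  | cons v l ih =>
    intro row hr j hj
    simp only [List.foldl_cons]
    rw [ih _ (by split_ifs <;> simp [hr]) j hj]
    by_cases hc : 0 ≤ v ∧ v < (k : Int)
    · by_cases hv : v = (j : Int)
      · have hjt : v.toNat = j := by omega
        have hjr : j < row.length := by omega
        simp [hv, hj, List.getD_eq_getElem?_getD, List.getElem?_set_self hjr]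
      · have hne : v.toNat ≠ j := by omega
        have : (v :: l).contains (j : Int) = l.contains (j : Int) := by
          simp
          intro h; exact absurd h.symm hv
        rw [this]
        simp [hc, List.getD_eq_getElem?_getD, List.getElem?_set_ne hne]
    · have hvne : v ≠ (j : Int) := by omega
      have : (v :: l).contains (j : Int) = l.contains (j : Int) := by
        simp
        intro h; exact absurd h.symm hvne
      rw [this]
      simp [hc]

/-- The marking fold over a zero row equals the membership-map indicator row. -/
lemma pv_mark_eq_map (k : Nat) (l : List Int) :
    l.foldl (fun (row : List Int) (v : Int) =>
        if 0 ≤ v ∧ v < (k : Int) then row.set v.toNat 1 else row)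
      (List.replicate k (0 : Int))
      = (List.range k).map (fun (j : Nat) => if l.contains ((j : Nat) : Int) then (1 : Int) else 0) := by
  apply List.ext_getElem
  · rw [pv_mark_length]; simp
  · intro j h1 h2
    have hj : j < k := by
      have := pv_mark_length k l (List.replicate k (0 : Int))
      simp [this] at h1; omega
    have := pv_mark_getD k l (List.replicate k (0 : Int)) (by simp) j hj
    rw [List.getD_eq_getElem?_getD, List.getElem?_eq_getElem h1] at this
    simp only [Option.getD_some] at this
    rw [this]
    simp [hj]

theorem pv_main (dane : List (List Int)) (lista : List Int)
    (hpre : Pre_dodaj_nowe_danie dane lista) :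
    dodaj_nowe_danie dane lista = dodaj_nowe_danie_alt dane lista := by
  obtain ⟨hne, hrows⟩ := hpre
  obtain ⟨r0, dtl, rfl⟩ : ∃ r0 dtl, dane = r0 :: dtl := by
    cases dane with
    | nil => exact absurd rfl hne
    | cons a l => exact ⟨a, l, rfl⟩
  have hk0 : ((PySem.List.pyGet? (r0 :: dtl) 0).getD []).length = r0.length := by
    simp [PySem.List.pyGet?, PySem.List.pyIdx?]
  simp only [dodaj_nowe_danie, dodaj_nowe_danie_alt, hk0, Nat.add_sub_cancel]
  rw [pv_outer _ r0.length ((r0 :: dtl).length + 1)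
      ((List.range ((r0 :: dtl).length + 1)).map (fun _ => List.replicate r0.length (0 : Int)))
      (by simp) (by intro r hr; simp at hr; simp [hr])]
  rw [List.drop_eq_nil_iff.mpr (by simp), List.append_nil]
  rw [List.range_succ, List.map_append]
  congr 1
  · -- copied rows
    apply List.ext_getElem
    · simp
    · intro i h1 h2
      simp only [List.getElem_map, List.getElem_range]
      have hi : i < (r0 :: dtl).length := by simpa using h1
      have hik : r0.length ≤ ((r0 :: dtl)[i]'hi).length := by
        have := hrows _ (List.getElem_mem hi)
        simpa using this
      have hinej : i ≠ (r0 :: dtl).length := by omega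
      simp only [if_neg hinej]
      rw [PySem.List.slice_to_natCast]
      have hgd : (r0 :: dtl).getD i [] = (r0 :: dtl)[i]'hi := by
        simp [List.getD_eq_getElem?_getD, List.getElem?_eq_getElem hi]
      rw [hgd]
      exact pv_map_range_getD _ _ hik
  · -- indicator row: the marking fold equals A's membership map
    rw [pv_mark_eq_map]
    simp

-- ===== VERDICT (by name: the statement is the Claim_ definition above) =====
theorem dodaj_nowe_danie_spec : Claim_equal_dodaj_nowe_danie := by
  intro dane lista _ hpre
  unfold Spec_dodaj_nowe_danie
  exact pv_main dane lista hpre
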